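-- pv_equiv track=rewrite | github.com/hukaisdu/HDL | Section4/Section3/initialization.py | getXDegree
-- ===== SOURCE A (Python) =====
-- def monomialDegree( s ):
--     d = 0
--     for ss in s:
--         if ss == 'x' or ss == 'y':
--             d += 1
--     return d
--
-- def getXDegree( s ):
--     if str( s ) == '0':
--         return -1
--
--     md = 0
--     s = str( s ).split( '+' )
--     for ss in s:
--         d = monomialDegree( ss )
--         if d > md:
--             md = d
--     return md
-- ===== SOURCE B (Python) =====
-- def getXDegree(s):
--     if str(s) == '0':
--         return -1
--     current = 0
--     md = 0
--     for c in str(s):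
--         if c == '+':
--             current = 0
--         elif c == 'x' or c == 'y':
--             current += 1
--             if current > md:
--                 md = current
--     return md
-- ===== Notes on version B (the rewrite author's own statement) =====
-- stated objective: simpler
-- what changed: Replaces split-on-'+' plus a per-monomial counting helper with one flat single-pass scan keeping a reset counter and a running maximum; no split list and no helper function.
import Mathlib
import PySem

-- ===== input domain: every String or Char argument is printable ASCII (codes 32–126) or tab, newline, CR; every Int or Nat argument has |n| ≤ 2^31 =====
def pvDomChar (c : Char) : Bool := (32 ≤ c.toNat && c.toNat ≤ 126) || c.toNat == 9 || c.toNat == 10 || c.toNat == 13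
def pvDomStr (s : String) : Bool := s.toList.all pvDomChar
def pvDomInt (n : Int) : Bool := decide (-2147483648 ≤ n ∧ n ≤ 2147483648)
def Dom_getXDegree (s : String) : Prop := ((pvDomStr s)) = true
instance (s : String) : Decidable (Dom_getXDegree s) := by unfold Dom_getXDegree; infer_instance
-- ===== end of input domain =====

-- B replaces A's split-on-'+' + per-monomial counting helper with one flat scan
-- keeping a reset counter and a running maximum (objective: simpler).

-- ===== PORT A =====
-- helper 'monomialDegree' of A, counting 'x'/'y' characters of one monomial
def monomialDegree (ss : List Char) : Int :=
  ss.foldl (fun d c => if c = 'x' ∨ c = 'y' then d + 1 else d) 0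

def getXDegree (s : String) : Int :=
  if s = "0" then -1
  else
    (PySem.Chars.splitOn s.toList ['+']).foldl
      (fun md ss => let d := monomialDegree ss; if d > md then d else md) 0

-- ===== PORT B =====
-- B's loop body: state (current, md); '+' resets current, 'x'/'y' bumps current and md
def bStep (p : Int × Int) (c : Char) : Int × Int :=
  if c = '+' then (0, p.2)
  else if c = 'x' ∨ c = 'y' then (p.1 + 1, if p.1 + 1 > p.2 then p.1 + 1 else p.2)
  else p

def getXDegree_alt (s : String) : Int :=
  if s = "0" then -1
  else (s.toList.foldl bStep (0, 0)).2

-- ===== PRECONDITION & SPEC =====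
def Spec_getXDegree (s : String) (out : Int) : Prop := out = getXDegree_alt s
instance (s : String) (out : Int) : Decidable (Spec_getXDegree s out) := by unfold Spec_getXDegree; infer_instance

-- ===== CLAIM (what is proved, stated in full; the proofs are below) =====
def Claim_equal_getXDegree : Prop := ∀ (s : String), Dom_getXDegree s → Spec_getXDegree s (getXDegree s)

-- ===== LEMMAS AND PROOFS =====

-- first piece and remaining pieces of a '+'-split, recursively
def split1 : List Char → List Char × List (List Char)
  | [] => ([], [])
  | c :: l =>
      let r := split1 l
      if c = '+' then ([], r.1 :: r.2) else (c :: r.1, r.2)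

-- A's max-accumulating fold over a list of degrees
def afold (m : Int) (ds : List Int) : Int :=
  ds.foldl (fun m d => if d > m then d else m) m

lemma afold_nil (m : Int) : afold m [] = m := rfl

lemma afold_cons (m d : Int) (ds : List Int) :
    afold m (d :: ds) = afold (if d > m then d else m) ds := rfl

lemma afold_head_ge (a m d : Int) (ds : List Int) (h : a ≤ d) :
    afold (if a > m then a else m) (d :: ds) = afold m (d :: ds) := by
  rw [afold_cons, afold_cons]
  congr 1
  split_ifs <;> omega

-- characterization of PySem's fuel-based splitOn.go for the single-char separator '+'
lemma splitOn_go_plus (l : List Char) :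
    ∀ (fuel : Nat) (cur : List Char) (acc : List (List Char)), l.length < fuel →
      PySem.Chars.splitOn.go ['+'] fuel l cur acc
        = acc.reverse ++ (cur.reverse ++ (split1 l).1) :: (split1 l).2 := by
  induction l with
  | nil =>
      intro fuel cur acc h
      cases fuel with
      | zero => omega
      | succ f => simp [PySem.Chars.splitOn.go, split1]
  | cons c rest ih =>
      intro fuel cur acc h
      cases fuel with
      | zero => omega
      | succ f =>
        by_cases hc : c = '+'
        · subst hc
          have hpre : List.isPrefixOf ['+'] ('+' :: rest) = true := by
            simp [List.isPrefixOf]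
          rw [show PySem.Chars.splitOn.go ['+'] (f + 1) ('+' :: rest) cur acc
                = PySem.Chars.splitOn.go ['+'] f (List.drop 1 ('+' :: rest)) []
                    (cur.reverse :: acc) by
              simp [PySem.Chars.splitOn.go, hpre]]
          simp only [List.drop_succ_cons, List.drop_zero]
          rw [ih f [] (cur.reverse :: acc) (by simpa using Nat.lt_of_succ_lt_succ h)]
          simp [split1]
        · have hpre : List.isPrefixOf ['+'] (c :: rest) = false := by
            simp only [List.isPrefixOf, Bool.and_eq_false_iff]
            simp [Ne.symm hc]
          rw [show PySem.Chars.splitOn.go ['+'] (f + 1) (c :: rest) cur acc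
                = PySem.Chars.splitOn.go ['+'] f rest (c :: cur) acc by
              simp [PySem.Chars.splitOn.go, hpre]]
          rw [ih f (c :: cur) acc (by simpa using Nat.lt_of_succ_lt_succ h)]
          simp [split1, hc]

lemma splitOn_plus (l : List Char) :
    PySem.Chars.splitOn l ['+'] = (split1 l).1 :: (split1 l).2 := by
  rw [PySem.Chars.splitOn.eq_def, splitOn_go_plus l (l.length + 1) [] [] (by omega)]
  simp

-- shift lemma for the x/y counting fold
lemma cnt_shift (l : List Char) :
    ∀ (d : Int),
      l.foldl (fun d c => if c = 'x' ∨ c = 'y' then d + 1 else d) d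
        = d + l.foldl (fun d c => if c = 'x' ∨ c = 'y' then d + 1 else d) 0 := by
  induction l with
  | nil => intro d; simp
  | cons c rest ih =>
      intro d
      simp only [List.foldl_cons]
      rw [ih, ih (if c = 'x' ∨ c = 'y' then (0 : Int) + 1 else 0)]
      split_ifs <;> ring

lemma mono_cons (c : Char) (l : List Char) :
    monomialDegree (c :: l)
      = (if c = 'x' ∨ c = 'y' then 1 else 0) + monomialDegree l := by
  simp only [monomialDegree, List.foldl_cons]
  rw [cnt_shift]
  split_ifs <;> ring

lemma mono_nonneg (l : List Char) : 0 ≤ monomialDegree l := by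
  induction l with
  | nil => simp [monomialDegree]
  | cons c rest ih => rw [mono_cons]; split_ifs <;> omega

lemma bStep_plus (p : Int × Int) : bStep p '+' = (0, p.2) := by simp [bStep]

lemma bStep_xy (p : Int × Int) (c : Char) (hc : ¬ c = '+') (hxy : c = 'x' ∨ c = 'y') :
    bStep p c = (p.1 + 1, if p.1 + 1 > p.2 then p.1 + 1 else p.2) := by
  simp [bStep, hc, hxy]

lemma bStep_other (p : Int × Int) (c : Char) (hc : ¬ c = '+') (hxy : ¬ (c = 'x' ∨ c = 'y')) :
    bStep p c = p := by
  simp [bStep, hc, hxy]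

-- B's scan computes A's max over the '+'-split pieces
lemma bScan (l : List Char) :
    ∀ (cur md : Int), 0 ≤ cur → cur ≤ md →
      (l.foldl bStep (cur, md)).2
        = afold md ((cur + monomialDegree (split1 l).1)
            :: (split1 l).2.map monomialDegree) := by
  induction l with
  | nil =>
      intro cur md h0 h1
      simp only [List.foldl_nil, split1, List.map_nil]
      rw [show cur + monomialDegree [] = cur from by simp [monomialDegree],
          afold_cons, afold_nil]
      split_ifs <;> omega
  | cons c rest ih =>
      intro cur md h0 h1
      by_cases hc : c = '+'
      · subst hc
        simp only [List.foldl_cons, bStep_plus]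
        rw [ih 0 md le_rfl (le_trans h0 h1)]
        rw [show split1 ('+' :: rest) = ([], (split1 rest).1 :: (split1 rest).2)
              from by simp [split1]]
        simp only [List.map_cons, zero_add]
        rw [show cur + monomialDegree [] = cur from by simp [monomialDegree]]
        conv_rhs => rw [afold_cons]
        rw [if_neg (show ¬ cur > md by omega), afold_cons]
      · by_cases hxy : c = 'x' ∨ c = 'y'
        · simp only [List.foldl_cons, bStep_xy _ _ hc hxy]
          rw [ih (cur + 1) (if cur + 1 > md then cur + 1 else md)
                (by omega) (by split_ifs <;> omega)]
          rw [show split1 (c :: rest) = (c :: (split1 rest).1, (split1 rest).2)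
                from by simp [split1, hc]]
          rw [mono_cons, if_pos hxy]
          rw [show cur + (1 + monomialDegree (split1 rest).1)
                = cur + 1 + monomialDegree (split1 rest).1 from by ring]
          exact afold_head_ge (cur + 1) md _ _
            (by have := mono_nonneg (split1 rest).1; omega)
        · simp only [List.foldl_cons, bStep_other _ _ hc hxy]
          rw [ih cur md h0 h1]
          rw [show split1 (c :: rest) = (c :: (split1 rest).1, (split1 rest).2)
                from by simp [split1, hc]]
          rw [mono_cons, if_neg hxy]
          simp

-- ===== VERDICT (by name: the statement is the Claim_ definition above) =====
theorem getXDegree_spec : Claim_equal_getXDegree := by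
  intro s _
  unfold Spec_getXDegree getXDegree getXDegree_alt
  by_cases h0 : s = "0"
  · simp [h0]
  · simp only [if_neg h0]
    rw [splitOn_plus, bScan s.toList 0 0 le_rfl le_rfl]
    simp only [zero_add]
    rw [show ((split1 s.toList).1 :: (split1 s.toList).2).foldl
          (fun md ss => let d := monomialDegree ss; if d > md then d else md) 0
        = afold 0 (((split1 s.toList).1 :: (split1 s.toList).2).map monomialDegree) by
        simp [afold, List.foldl_map]]
    simp [List.map_cons, afold]
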